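-- pv_equiv track=rewrite | github.com/Sullivan18/SentimentAnalysis | app.py | classify_based_on_words
-- ===== SOURCE A (Python) =====
-- def classify_based_on_words(text, word_weights):
--     scores = {category: 0 for category in word_weights}
--     words = text.split()
--     for word in words:
--         for category, weights in word_weights.items():
--             if word in weights:
--                 scores[category] += weights[word]
--     return scores  # Retorna os escores de todas as categorias
-- ===== SOURCE B (Python) =====
-- def classify_based_on_words(text, word_weights):
--     # Count each word once, then score each category in a single pass over
--     # its weight table (weight * count), instead of scanning every category
--     # for every word.
--     counts = {}
--     for w in text.split():
--         counts[w] = counts.get(w, 0) + 1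
--     return {category: sum(v * counts.get(w, 0) for w, v in weights.items())
--             for category, weights in word_weights.items()}
-- ===== Notes on version B (the rewrite author's own statement) =====
-- stated objective: alternative
-- what changed: B builds a word-count table in one pass over the text and then scores each category by a single scan of its weight table (sum of weight * count), instead of A's scan of every category for every word; it trades A's W*C membership tests for W count updates plus one pass over all weight entries.
import Mathlib
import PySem

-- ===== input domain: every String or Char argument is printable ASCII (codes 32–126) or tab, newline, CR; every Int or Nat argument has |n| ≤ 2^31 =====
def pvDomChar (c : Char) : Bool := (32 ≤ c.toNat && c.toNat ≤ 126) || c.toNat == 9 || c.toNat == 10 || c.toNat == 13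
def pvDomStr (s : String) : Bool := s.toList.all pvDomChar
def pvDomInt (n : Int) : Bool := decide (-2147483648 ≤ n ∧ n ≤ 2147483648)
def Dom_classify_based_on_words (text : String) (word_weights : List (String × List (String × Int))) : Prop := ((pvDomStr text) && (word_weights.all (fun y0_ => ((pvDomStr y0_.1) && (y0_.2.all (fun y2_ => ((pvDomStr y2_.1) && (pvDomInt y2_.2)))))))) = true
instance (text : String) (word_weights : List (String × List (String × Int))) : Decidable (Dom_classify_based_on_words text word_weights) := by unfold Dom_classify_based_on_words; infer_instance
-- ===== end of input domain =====

-- B replaces A's per-word scan over every category by a word-count table built in one pass over the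
-- text plus a single scan of each category's weight table (objective: alternative algorithm).

-- ===== PORT A =====
-- body of A's inner loop over word_weights.items(): 'if word in weights: scores[category] += weights[word]'
-- (weights[word] is ported as getD, exact here because it sits under the 'word in weights' check)
def pvStepA (word : String) (sc : PySem.Dict String Int) (cw : String × List (String × Int)) : PySem.Dict String Int :=
  if (PySem.Dict.ofList cw.2).contains word then
    sc.modify cw.1 0 (· + (PySem.Dict.ofList cw.2).getD word 0)
  else sc

def classify_based_on_words (text : String) (word_weights : List (String × List (String × Int))) : List (String × Int) :=
  let ww := PySem.Dict.ofList word_weights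
  let scores := ww.keys.foldl (fun d c => d.insert c (0 : Int)) PySem.Dict.empty
  let words := PySem.Str.split₀ text
  let scores := words.foldl (fun sc word => ww.items.foldl (pvStepA word) sc) scores
  scores.items

-- ===== PORT B =====
def classify_based_on_words_alt (text : String) (word_weights : List (String × List (String × Int))) : List (String × Int) :=
  let counts := (PySem.Str.split₀ text).foldl
    (fun d w => d.insert w (d.getD w 0 + 1)) PySem.Dict.empty
  (PySem.Dict.ofList word_weights).items.map (fun cw =>
    (cw.1, (PySem.Dict.ofList cw.2).items.foldl (fun s wv => s + wv.2 * counts.getD wv.1 0) 0))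

-- ===== PRECONDITION & SPEC =====
def Spec_classify_based_on_words (text : String) (word_weights : List (String × List (String × Int))) (out : List (String × Int)) : Prop := out = classify_based_on_words_alt text word_weights
instance (text : String) (word_weights : List (String × List (String × Int))) (out : List (String × Int)) : Decidable (Spec_classify_based_on_words text word_weights out) := by unfold Spec_classify_based_on_words; infer_instance

-- ===== CLAIM (what is proved, stated in full; the proofs are below) =====
def Claim_equal_classify_based_on_words : Prop := ∀ (text : String) (word_weights : List (String × List (String × Int))), Dom_classify_based_on_words text word_weights → Spec_classify_based_on_words text word_weights (classify_based_on_words text word_weights)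

-- ===== LEMMAS AND PROOFS =====

-- the weight A adds to category cw.1 for one word
def pvAdd (word : String) (cw : String × List (String × Int)) : Int :=
  ((PySem.Dict.ofList cw.2).get? word).getD 0

lemma pvStepA_getD (word x : String) (sc : PySem.Dict String Int) (cw : String × List (String × Int)) :
    (pvStepA word sc cw).getD x 0 = sc.getD x 0 + (if x = cw.1 then pvAdd word cw else 0) := by
  unfold pvStepA pvAdd
  by_cases h : (PySem.Dict.ofList cw.2).contains word
  · rw [if_pos h, PySem.Dict.getD_modify]
    rw [PySem.Dict.getD_eq_get?_getD (PySem.Dict.ofList cw.2)]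
    split_ifs with hx
    · subst hx; ring
    · ring
  · have h0 : (PySem.Dict.ofList cw.2).get? word = none := by
      rw [PySem.Dict.get?_eq_none_iff_contains]; simpa using h
    simp [h, h0]

lemma inner_getD (word x : String) (l : List (String × List (String × Int))) :
    ∀ sc : PySem.Dict String Int,
      (l.foldl (pvStepA word) sc).getD x 0
        = sc.getD x 0 + (l.map (fun cw => if x = cw.1 then pvAdd word cw else 0)).sum := by
  induction l with
  | nil => simp
  | cons cw t ih => intro sc; simp [List.foldl_cons, ih, pvStepA_getD, add_assoc]

lemma outer_getD (x : String) (words : List String) (l : List (String × List (String × Int))) :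
    ∀ sc : PySem.Dict String Int,
      (words.foldl (fun sc word => l.foldl (pvStepA word) sc) sc).getD x 0
        = sc.getD x 0 + (words.map (fun w => (l.map (fun cw => if x = cw.1 then pvAdd w cw else 0)).sum)).sum := by
  induction words with
  | nil => simp
  | cons w t ih => intro sc; simp [List.foldl_cons, ih, inner_getD, add_assoc]

lemma pvStepA_keys (word : String) (sc : PySem.Dict String Int) (cw : String × List (String × Int))
    (h : cw.1 ∈ sc.keys) : (pvStepA word sc cw).keys = sc.keys := by
  unfold pvStepA
  split_ifs with hc
  · rw [PySem.Dict.keys_modify, PySem.Dict.keys_insert_of_contains]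
    exact (PySem.Dict.contains_iff_mem_keys _ _).2 h
  · rfl

lemma inner_keys (word : String) (l : List (String × List (String × Int))) :
    ∀ sc : PySem.Dict String Int, (∀ cw ∈ l, cw.1 ∈ sc.keys) →
      (l.foldl (pvStepA word) sc).keys = sc.keys := by
  induction l with
  | nil => intro sc _; rfl
  | cons cw t ih =>
    intro sc h
    have hk := pvStepA_keys word sc cw (h cw (by simp))
    rw [List.foldl_cons, ih _ (fun c hc => by rw [hk]; exact h c (List.mem_cons_of_mem _ hc)), hk]

lemma outer_keys (words : List String) (l : List (String × List (String × Int))) :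
    ∀ sc : PySem.Dict String Int, (∀ cw ∈ l, cw.1 ∈ sc.keys) →
      (words.foldl (fun sc word => l.foldl (pvStepA word) sc) sc).keys = sc.keys := by
  induction words with
  | nil => intro sc _; rfl
  | cons w t ih =>
    intro sc h
    have hk := inner_keys w l sc h
    rw [List.foldl_cons, ih _ (fun c hc => by rw [hk]; exact h c hc), hk]

lemma init_getD (ks : List String) (x : String) :
    ∀ d : PySem.Dict String Int, (∀ y, d.getD y 0 = 0) →
      (ks.foldl (fun d c => d.insert c (0 : Int)) d).getD x 0 = 0 := by
  induction ks with
  | nil => intro d h; exact h x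
  | cons k t ih =>
    intro d h
    rw [List.foldl_cons]
    exact ih _ (fun y => by rw [PySem.Dict.getD_insert]; split_ifs <;> simp [h])

lemma init_keys (ks : List String) (h : ks.Nodup) :
    (ks.foldl (fun d c => d.insert c (0 : Int)) PySem.Dict.empty).keys = ks := by
  have := PySem.Dict.keys_foldl_insert (ν := Int) ks (fun _ _ => 0) PySem.Dict.empty
  simpa [PySem.Set.update_nil_left, PySem.Set.ofList_eq_self_of_nodup ks h, PySem.Dict.keys_empty] using this

-- unique-key sum: only cw's own entry contributes
lemma sum_if_eq_of_nodup {α : Type} (f : String × α → Int) (l : List (String × α))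
    (hnd : (l.map Prod.fst).Nodup) (cw : String × α) (hmem : cw ∈ l) :
    (l.map (fun q => if cw.1 = q.1 then f q else 0)).sum = f cw := by
  induction l with
  | nil => cases hmem
  | cons q t ih =>
    simp only [List.map_cons, List.nodup_cons] at hnd
    rcases List.mem_cons.1 hmem with h | h
    · subst h
      rw [List.map_cons, List.sum_cons, if_pos rfl]
      have hz : (t.map (fun q => if cw.1 = q.1 then f q else 0)).sum = 0 := by
        apply List.sum_eq_zero
        intro y hy
        rcases List.mem_map.1 hy with ⟨r, hr, rfl⟩
        rw [if_neg]
        intro he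
        exact hnd.1 (he ▸ List.mem_map_of_mem hr)
      rw [hz, add_zero]
    · rw [List.map_cons, List.sum_cons, if_neg, zero_add, ih hnd.2 h]
      intro he
      exact hnd.1 (he ▸ List.mem_map_of_mem h)

lemma sum_if_eq_get? (x : String) (l : List (String × Int)) (hnd : (l.map Prod.fst).Nodup) :
    (l.map (fun p => if p.1 = x then p.2 else 0)).sum = ((PySem.Dict.mk l).get? x).getD 0 := by
  induction l with
  | nil => simp [PySem.Dict.get?]
  | cons p t ih =>
    simp only [List.map_cons, List.nodup_cons] at hnd
    rw [List.map_cons, List.sum_cons, PySem.Dict.get?_mk_cons]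
    by_cases h : p.1 = x
    · subst h
      simp only [beq_self_eq_true, if_true, Option.getD_some]
      have hz : (t.map (fun q => if q.1 = p.1 then q.2 else 0)).sum = 0 := by
        apply List.sum_eq_zero
        intro y hy
        rcases List.mem_map.1 hy with ⟨r, hr, rfl⟩
        rw [if_neg]
        intro he
        exact hnd.1 (he ▸ List.mem_map_of_mem hr)
      rw [hz, add_zero]
    · rw [if_neg h, if_neg (show ¬((p.1 == x) = true) by simpa using h), zero_add]
      exact ih hnd.2

-- double counting: sum over words of the looked-up weight = sum over entries of weight * count
lemma sum_lookup_eq_sum_count (xs : List String) (l : List (String × Int))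
    (hnd : (l.map Prod.fst).Nodup) :
    (xs.map (fun w => ((PySem.Dict.mk l).get? w).getD 0)).sum
      = (l.map (fun p => p.2 * (xs.count p.1 : Int))).sum := by
  induction xs with
  | nil => simp
  | cons x t ih =>
    rw [List.map_cons, List.sum_cons, ih, ← sum_if_eq_get? x l hnd]
    have hpt : ∀ p : String × Int, p.2 * (((x :: t).count p.1 : Int))
        = (if p.1 = x then p.2 else 0) + p.2 * (t.count p.1 : Int) := by
      intro p
      by_cases h : p.1 = x
      · subst h
        rw [List.count_cons_self, if_pos rfl]
        push_cast
        ring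
      · have hc : (x :: t).count p.1 = t.count p.1 := by simp [Ne.symm h]
        rw [hc, if_neg h, zero_add]
    simp only [hpt]
    rw [List.sum_map_add]

lemma mk_items_eq {κ ν : Type} [BEq κ] (d : PySem.Dict κ ν) : PySem.Dict.mk d.items = d :=
  PySem.Dict.ext rfl

-- ===== VERDICT (by name: the statement is the Claim_ definition above) =====
theorem classify_based_on_words_spec : Claim_equal_classify_based_on_words := by
  intro text word_weights _
  unfold Spec_classify_based_on_words classify_based_on_words classify_based_on_words_alt
  set W := PySem.Dict.ofList word_weights with hW
  set words := PySem.Str.split₀ text with hwords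
  have hnd : W.keys.Nodup := PySem.Dict.nodup_keys_ofList word_weights
  have hkeys0 : (W.keys.foldl (fun d c => d.insert c (0 : Int)) PySem.Dict.empty).keys = W.keys :=
    init_keys W.keys hnd
  have hmemk : ∀ cw ∈ W.items, cw.1 ∈ (W.keys.foldl (fun d c => d.insert c (0 : Int)) PySem.Dict.empty).keys := by
    intro cw hcw
    rw [hkeys0]
    exact List.mem_map_of_mem hcw
  have hkeysF :
      ((words.foldl (fun sc word => W.items.foldl (pvStepA word) sc)
        (W.keys.foldl (fun d c => d.insert c (0 : Int)) PySem.Dict.empty))).keys = W.keys := by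
    rw [outer_keys words W.items _ hmemk, hkeys0]
  rw [PySem.Dict.items_eq_map_keys _ (by rw [hkeysF]; exact hnd) 0, hkeysF]
  have hkeysdef : W.keys = W.items.map Prod.fst := rfl
  rw [hkeysdef, List.map_map]
  apply List.map_congr_left
  intro cw hcw
  simp only [Function.comp_apply]
  apply congrArg (Prod.mk cw.1)
  -- value at category cw.1
  rw [outer_getD, init_getD _ cw.1 PySem.Dict.empty (fun y => PySem.Dict.getD_empty y 0), zero_add]
  have hndW : (W.items.map Prod.fst).Nodup := hkeysdef ▸ hnd
  have h1 : ∀ w : String,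
      (W.items.map (fun q => if cw.1 = q.1 then pvAdd w q else 0)).sum = pvAdd w cw :=
    fun w => sum_if_eq_of_nodup (pvAdd w) W.items hndW cw hcw
  rw [List.map_congr_left (fun w _ => h1 w)]
  have hndw : ((PySem.Dict.ofList cw.2).items.map Prod.fst).Nodup :=
    PySem.Dict.nodup_keys_ofList cw.2
  have h2 := sum_lookup_eq_sum_count words (PySem.Dict.ofList cw.2).items hndw
  rw [mk_items_eq] at h2
  unfold pvAdd
  rw [h2, PySem.List.foldl_add, zero_add]
  apply congrArg
  apply List.map_congr_left
  intro wv _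
  rw [PySem.Dict.getD_foldl_insert_add_one, PySem.Dict.getD_empty, zero_add]
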